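-- pv_equiv track=rewrite | github.com/stefi0320/AdventOfCode_25 | day11/main.py | can_reach_target
-- ===== SOURCE A (Python) =====
-- from collections import deque
--
-- def build_reverse_graph(graph):
--    """Build a reverse graph where edges point backwards"""
--    reverse_graph = {}
--    all_nodes = set(graph.keys())
--    for node in graph:
--       for neighbor in graph[node]:
--          all_nodes.add(neighbor)
--          if neighbor not in reverse_graph:
--             reverse_graph[neighbor] = []
--          reverse_graph[neighbor].append(node)
--    return reverse_graph
--
-- def can_reach_target(graph, target):
--    """Returns set of all nodes that can reach target using reverse BFS - O(V+E)"""
--    # Build reverse graph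
--    reverse_graph = build_reverse_graph(graph)
--
--    # BFS from target backwards
--    reachable = {target}
--    queue = deque([target])
--    while queue:
--       node = queue.popleft()
--       if node in reverse_graph:
--          for prev_node in reverse_graph[node]:
--             if prev_node not in reachable:
--                reachable.add(prev_node)
--                queue.append(prev_node)
--    return reachable
-- ===== SOURCE B (Python) =====
-- def can_reach_target(graph, target):
--     """Layered fixpoint reachability to target: no reverse graph, no queue.
--
--     Keep the reachable set and the current frontier; each round scans the
--     graph's keys and adds every not-yet-reachable node with an edge into the
--     frontier.  Stops when a round adds nothing.
--     """
--     reachable = {target}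
--     frontier = [target]
--     while frontier:
--         new = []
--         for v in frontier:
--             for u in graph:
--                 if u not in reachable and v in graph[u]:
--                     reachable.add(u)
--                     new.append(u)
--         frontier = new
--     return reachable
-- ===== Notes on version B (the rewrite author's own statement) =====
-- stated objective: alternative
-- what changed: Replaces A's explicitly built reverse-adjacency dict plus deque-based reverse BFS by a layered fixpoint sweep that never materialises a reverse graph: each round scans the graph's keys and adds every not-yet-reachable key with an edge into the current frontier, stopping when a round adds nothing.
import Mathlib
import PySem

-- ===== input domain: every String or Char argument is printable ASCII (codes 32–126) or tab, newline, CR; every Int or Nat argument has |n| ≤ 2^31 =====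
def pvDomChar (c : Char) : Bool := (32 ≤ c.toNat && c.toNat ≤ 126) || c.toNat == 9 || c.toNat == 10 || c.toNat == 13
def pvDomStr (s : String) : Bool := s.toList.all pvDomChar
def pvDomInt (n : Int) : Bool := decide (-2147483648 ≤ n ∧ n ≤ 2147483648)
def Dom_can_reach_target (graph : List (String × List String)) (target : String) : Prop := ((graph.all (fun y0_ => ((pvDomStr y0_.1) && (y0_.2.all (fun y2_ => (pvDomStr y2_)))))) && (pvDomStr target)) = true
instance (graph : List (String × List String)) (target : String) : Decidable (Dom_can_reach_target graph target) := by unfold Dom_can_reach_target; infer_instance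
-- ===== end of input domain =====

-- B replaces A's reverse-adjacency dict + deque BFS by a layered fixpoint sweep over the
-- graph's keys (no reverse graph is built); objective: alternative (same result, no speed claim).

-- ===== PORT A =====
-- 'all_nodes' in build_reverse_graph is computed by A but never used; the dead set is omitted.
def build_reverse_graph (graph : List (String × List String)) : PySem.Dict String (List String) :=
  (PySem.Dict.mk graph).keys.foldl (fun rg node =>
    ((PySem.Dict.mk graph).getD node []).foldl (fun rg neighbor =>
      rg.modify neighbor [] (fun l => l ++ [node])) rg) PySem.Dict.empty

-- loop body of 'for prev_node in reverse_graph[node]: if prev_node not in reachable: …'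
def bfs_add (st : PySem.Set String × List String) (p : String) : PySem.Set String × List String :=
  if PySem.Set.contains st.1 p then st else (PySem.Set.add st.1 p, st.2 ++ [p])

-- 'while queue' with fuel = number of pops; graph.length + 1 pops suffice (each queued node
-- beyond target is a distinct key of graph).  'if node in reverse_graph: for prev_node in
-- reverse_graph[node]' is the fold over getD … [] (an absent key contributes the empty list).
def bfs_loop (revG : PySem.Dict String (List String)) :
    Nat → PySem.Set String → List String → PySem.Set String
  | 0, reachable, _ => reachable
  | _+1, reachable, [] => reachable
  | fuel+1, reachable, node :: queue =>
    let st := (revG.getD node []).foldl bfs_add (reachable, queue)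
    bfs_loop revG fuel st.1 st.2

def can_reach_target (graph : List (String × List String)) (target : String) : List String :=
  let reverse_graph := build_reverse_graph graph
  bfs_loop reverse_graph (graph.length + 1) (PySem.Set.ofList [target]) [target]

-- ===== PORT B =====
-- 'for u in graph: if u not in reachable and v in graph[u]: reachable.add(u); new.append(u)'
def crt_scan (graph : List (String × List String)) (v : String)
    (st : PySem.Set String × List String) : PySem.Set String × List String :=
  (PySem.Dict.mk graph).keys.foldl (fun st u =>
    if !(PySem.Set.contains st.1 u) && ((PySem.Dict.mk graph).getD u []).contains v then
      (PySem.Set.add st.1 u, st.2 ++ [u]) else st) st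

-- 'while frontier' with fuel = number of rounds; graph.length + 1 rounds suffice (every round
-- but the first consumes at least one fresh key of graph).
def crt_loop (graph : List (String × List String)) :
    Nat → PySem.Set String → List String → PySem.Set String
  | 0, reachable, _ => reachable
  | _+1, reachable, [] => reachable
  | fuel+1, reachable, v :: frontier =>
    let st := (v :: frontier).foldl (fun st v => crt_scan graph v st) (reachable, [])
    crt_loop graph fuel st.1 st.2

def can_reach_target_alt (graph : List (String × List String)) (target : String) : List String :=
  crt_loop graph (graph.length + 1) (PySem.Set.ofList [target]) [target]

-- ===== PRECONDITION & SPEC =====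
-- Pre_ excludes association lists with duplicate keys: a Python dict cannot contain them, so
-- which of the duplicate values the dict carries (first vs last) is an artefact of the encoding.
def Pre_can_reach_target (graph : List (String × List String)) (target : String) : Prop :=
  (graph.map Prod.fst).Nodup

instance (graph : List (String × List String)) (target : String) : Decidable (Pre_can_reach_target graph target) := by unfold Pre_can_reach_target; infer_instance

def pvWitness_can_reach_target : (List (String × List String)) × String :=
  ([("a", ["t"]), ("b", ["a"])], "t")

def Spec_can_reach_target (graph : List (String × List String)) (target : String) (out : List String) : Prop := out = can_reach_target_alt graph target
instance (graph : List (String × List String)) (target : String) (out : List String) : Decidable (Spec_can_reach_target graph target out) := by unfold Spec_can_reach_target; infer_instance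

-- ===== CLAIM (what is proved, stated in full; the proofs are below) =====
def Claim_equal_can_reach_target : Prop := ∀ (graph : List (String × List String)) (target : String), Dom_can_reach_target graph target → Pre_can_reach_target graph target → Spec_can_reach_target graph target (can_reach_target graph target)

-- ===== LEMMAS AND PROOFS =====

-- generic step: add x to the set and append it to the output list when cnd holds
def gstep (cnd : PySem.Set String → String → Bool)
    (st : PySem.Set String × List String) (x : String) : PySem.Set String × List String :=
  if cnd st.1 x then (PySem.Set.add st.1 x, st.2 ++ [x]) else st

-- A's per-node processing of the predecessor list, and the two round functions
def stepA (revG : PySem.Dict String (List String))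
    (st : PySem.Set String × List String) (v : String) : PySem.Set String × List String :=
  (revG.getD v []).foldl bfs_add st

def procB (graph : List (String × List String)) (F : List String)
    (R : PySem.Set String) : PySem.Set String × List String :=
  F.foldl (fun st v => crt_scan graph v st) (R, [])

lemma bfs_add_eq_gstep : bfs_add = gstep (fun R p => !(PySem.Set.contains R p)) := by
  funext st p
  obtain ⟨R, q⟩ := st
  by_cases h : PySem.Set.contains R p
  · simp [bfs_add, gstep, h]
  · simp [bfs_add, gstep, h]

-- shift: a fold whose step only appends to the second component
lemma foldl_shift (f : PySem.Set String × List String → String → PySem.Set String × List String)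
    (hf : ∀ R q v, f (R, q) v = ((f (R, []) v).1, q ++ (f (R, []) v).2)) :
    ∀ (xs : List String) (R : PySem.Set String) (q : List String),
      xs.foldl f (R, q) = ((xs.foldl f (R, [])).1, q ++ (xs.foldl f (R, [])).2) := by
  intro xs
  induction xs with
  | nil => intro R q; simp
  | cons x xs ih =>
    intro R q
    have hx : f (R, q) x = ((f (R, []) x).1, q ++ (f (R, []) x).2) := hf R q x
    have hx0 : f (R, []) x = ((f (R, []) x).1, (f (R, []) x).2) := rfl
    simp only [List.foldl_cons, hx]
    rw [ih ((f (R, []) x).1) (q ++ (f (R, []) x).2), hx0,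
        ih ((f (R, []) x).1) ((f (R, []) x).2)]
    simp [List.append_assoc]

lemma gstep_shift (cnd : PySem.Set String → String → Bool) :
    ∀ R q v, gstep cnd (R, q) v = ((gstep cnd (R, []) v).1, q ++ (gstep cnd (R, []) v).2) := by
  intro R q v
  by_cases h : cnd R v
  · simp [gstep, h]
  · simp [gstep, h]

-- delta of a gstep-fold: the set grows exactly by the output list, which is fresh and nodup
lemma runG_delta (cnd : PySem.Set String → String → Bool)
    (hc : ∀ R x, cnd R x = true → x ∉ R) :
    ∀ (xs : List String) (R : PySem.Set String),
      (xs.foldl (gstep cnd) (R, [])).1 = R ++ (xs.foldl (gstep cnd) (R, [])).2 ∧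
      (xs.foldl (gstep cnd) (R, [])).2.Nodup ∧
      ∀ x ∈ (xs.foldl (gstep cnd) (R, [])).2, x ∈ xs ∧ x ∉ R := by
  intro xs
  induction xs with
  | nil => intro R; simp
  | cons x xs ih =>
    intro R
    by_cases h : cnd R x
    · have hxR : x ∉ R := hc R x h
      have hcts : PySem.Set.contains R x = false := by
        cases hct : PySem.Set.contains R x with
        | false => rfl
        | true => exact absurd ((PySem.Set.contains_iff R x).mp hct) hxR
      have hadd : PySem.Set.add R x = R ++ [x] := by simp [PySem.Set.add, hcts, hxR]
      have hstep : gstep cnd (R, ([] : List String)) x = (R ++ [x], [x]) := by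
        simp [gstep, h, hadd]
      have hsh := foldl_shift (gstep cnd) (gstep_shift cnd) xs (R ++ [x]) [x]
      obtain ⟨ih1, ih2, ih3⟩ := ih (R ++ [x])
      simp only [List.foldl_cons, hstep, hsh]
      refine ⟨by rw [ih1]; simp, ?_, ?_⟩
      · rw [List.singleton_append]
        exact List.nodup_cons.mpr ⟨fun hxd => (ih3 x hxd).2 (by simp), ih2⟩
      · intro y hy
        rw [List.singleton_append] at hy
        rcases List.mem_cons.mp hy with h1 | h2
        · exact ⟨by simp [h1], by rw [h1]; exact hxR⟩
        · obtain ⟨hm, hnm⟩ := ih3 y h2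
          exact ⟨by simp [hm], fun hyR => hnm (by simp [hyR])⟩
    · have hstep : gstep cnd (R, ([] : List String)) x = (R, []) := by simp [gstep, h]
      obtain ⟨ih1, ih2, ih3⟩ := ih R
      simp only [List.foldl_cons, hstep]
      refine ⟨ih1, ih2, fun y hy => ?_⟩
      obtain ⟨hm, hnm⟩ := ih3 y hy
      exact ⟨by simp [hm], hnm⟩

-- per-node equality: folding reverse_graph[v] with bfs_add = scanning graph's keys (B's step)
lemma bfs_add_of_mem (st : PySem.Set String × List String) (u : String) (h : u ∈ st.1) :
    bfs_add st u = st := by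
  simp [bfs_add, (PySem.Set.contains_iff st.1 u).mpr h, h]

lemma bfs_add_of_not_mem (st : PySem.Set String × List String) (u : String) (h : u ∉ st.1) :
    bfs_add st u = (PySem.Set.add st.1 u, st.2 ++ [u]) := by
  have : PySem.Set.contains st.1 u = false := by
    cases hct : PySem.Set.contains st.1 u with
    | false => rfl
    | true => exact absurd ((PySem.Set.contains_iff st.1 u).mp hct) h
  simp [bfs_add, this, h]

-- repeated bfs_add of the same element: a no-op once the element is in the set
lemma const_fold_mem (u : String) :
    ∀ (l : List String) (st : PySem.Set String × List String),
      PySem.Set.contains st.1 u = true →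
      (l.map (fun _ => u)).foldl bfs_add st = st := by
  intro l
  induction l with
  | nil => intro st h; rfl
  | cons w l ih =>
    intro st h
    simp only [List.map_cons, List.foldl_cons]
    rw [bfs_add_of_mem st u ((PySem.Set.contains_iff st.1 u).mp h)]
    exact ih st h

lemma const_fold_ne_nil (u : String) (l : List String) (hl : l ≠ [])
    (st : PySem.Set String × List String) :
    (l.map (fun _ => u)).foldl bfs_add st = bfs_add st u := by
  cases l with
  | nil => exact absurd rfl hl
  | cons w l =>
    simp only [List.map_cons, List.foldl_cons]
    apply const_fold_mem
    by_cases h : u ∈ st.1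
    · rw [bfs_add_of_mem st u h]; exact (PySem.Set.contains_iff st.1 u).mpr h
    · rw [bfs_add_of_not_mem st u h]
      exact (PySem.Set.contains_iff _ u).mpr ((PySem.Set.mem_add st.1 u u).mpr (Or.inr rfl))

-- folding one key's segment of reverse_graph[v] = B's single scan step for that key
lemma seg_fold (ns : List String) (u v : String) (st : PySem.Set String × List String) :
    ((ns.filter (fun w => w == v)).map (fun _ => u)).foldl bfs_add st =
      (if !(PySem.Set.contains st.1 u) && ns.contains v then
        (PySem.Set.add st.1 u, st.2 ++ [u]) else st) := by
  cases hvc : ns.contains v with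
  | false =>
    have hnil : ns.filter (fun w => w == v) = [] := by
      refine List.filter_eq_nil_iff.mpr fun w hw hbeq => ?_
      have : v ∈ ns := by rw [← (beq_iff_eq (a := w) (b := v)).mp hbeq]; exact hw
      exact (by simpa using hvc : v ∉ ns) this
    simp [hnil]
  | true =>
    have hv : v ∈ ns := List.contains_iff_mem.mp hvc
    have hne : ns.filter (fun w => w == v) ≠ [] := by
      intro hnil
      exact absurd (beq_self_eq_true v) (by simpa using List.filter_eq_nil_iff.mp hnil v hv)
    rw [const_fold_ne_nil u _ hne st]
    by_cases h : u ∈ st.1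
    · rw [bfs_add_of_mem st u h, (PySem.Set.contains_iff st.1 u).mpr h]
      simp
    · have hcf : PySem.Set.contains st.1 u = false := by
        cases hct : PySem.Set.contains st.1 u with
        | false => rfl
        | true => exact absurd ((PySem.Set.contains_iff st.1 u).mp hct) h
      rw [bfs_add_of_not_mem st u h, hcf]
      simp

-- reverse_graph[v] as a filter of the edge list
lemma revG_getD (graph : List (String × List String)) (v : String) :
    (build_reverse_graph graph).getD v [] =
      (((PySem.Dict.mk graph).keys.flatMap
        (fun u => ((PySem.Dict.mk graph).getD u []).map (fun w => (w, u)))).filter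
          (fun (p : String × String) => p.1 == v)).map (fun (p : String × String) => p.2) := by
  have hb : build_reverse_graph graph =
      ((PySem.Dict.mk graph).keys.flatMap
        (fun u => ((PySem.Dict.mk graph).getD u []).map (fun w => (w, u)))).foldl
        (fun d p => d.modify p.1 [] (fun l => l ++ [p.2])) PySem.Dict.empty := by
    rw [List.foldl_flatMap]
    unfold build_reverse_graph
    congr 1
    funext d u
    rw [List.foldl_map]
  rw [hb, PySem.Dict.getD_foldl_modify_append]
  simp

lemma stepA_eq_crt_scan (graph : List (String × List String)) (v : String)
    (st : PySem.Set String × List String) :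
    stepA (build_reverse_graph graph) st v = crt_scan graph v st := by
  unfold stepA crt_scan
  rw [revG_getD, List.filter_flatMap, List.map_flatMap, List.foldl_flatMap]
  congr 1
  funext st u
  have hseg : (((PySem.Dict.mk graph).getD u []).map (fun w => (w, u))).filter
      (fun p => p.1 == v) = (((PySem.Dict.mk graph).getD u []).filter
        (fun w => w == v)).map (fun w => (w, u)) := by
    rw [List.filter_map]
    rfl
  rw [hseg, List.map_map]
  have : ((fun p => p.2) ∘ (fun w => (w, u)) : String → String) = fun _ => u := rfl
  rw [this, seg_fold]

lemma procA_eq_procB (graph : List (String × List String)) (F : List String)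
    (R : PySem.Set String) :
    F.foldl (stepA (build_reverse_graph graph)) (R, []) = procB graph F R := by
  unfold procB
  congr 1
  funext st v
  exact stepA_eq_crt_scan graph v st

lemma bfs_loop_nil (revG : PySem.Dict String (List String)) (m : Nat) (R : PySem.Set String) :
    bfs_loop revG m R [] = R := by
  cases m <;> rfl

lemma crt_loop_nil (graph : List (String × List String)) (m : Nat) (R : PySem.Set String) :
    crt_loop graph m R [] = R := by
  cases m <;> rfl

lemma stepA_shift (revG : PySem.Dict String (List String)) :
    ∀ (R : PySem.Set String) (q : List String) (v : String),
      stepA revG (R, q) v = ((stepA revG (R, []) v).1, q ++ (stepA revG (R, []) v).2) := by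
  intro R q v
  unfold stepA
  rw [bfs_add_eq_gstep]
  exact foldl_shift _ (gstep_shift _) (revG.getD v []) R q

-- FIFO decomposition: popping a whole prefix F of the queue = one layered round over F
lemma bfs_loop_decomp (revG : PySem.Dict String (List String)) :
    ∀ (F G : List String) (R : PySem.Set String) (m : Nat),
      bfs_loop revG (F.length + m) R (F ++ G) =
        bfs_loop revG m (F.foldl (stepA revG) (R, [])).1
          (G ++ (F.foldl (stepA revG) (R, [])).2) := by
  intro F
  induction F with
  | nil => intro G R m; simp [bfs_loop]
  | cons v F ih =>
    intro G R m
    have hlen : (v :: F).length + m = (F.length + m) + 1 := by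
      simp [List.length_cons]; omega
    rw [hlen]
    have hstep : bfs_loop revG ((F.length + m) + 1) R ((v :: F) ++ G) =
        bfs_loop revG (F.length + m) (stepA revG (R, F ++ G) v).1 (stepA revG (R, F ++ G) v).2 := by
      simp only [List.cons_append, bfs_loop, stepA]
    rw [hstep, stepA_shift revG R (F ++ G) v, List.append_assoc,
        ih (G ++ (stepA revG (R, []) v).2) ((stepA revG (R, []) v).1) m]
    have houter : (v :: F).foldl (stepA revG) (R, []) =
        ((F.foldl (stepA revG) ((stepA revG (R, []) v).1, [])).1,
          (stepA revG (R, []) v).2 ++ (F.foldl (stepA revG) ((stepA revG (R, []) v).1, [])).2) := by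
      simp only [List.foldl_cons]
      have : stepA revG (R, []) v = ((stepA revG (R, []) v).1, (stepA revG (R, []) v).2) := rfl
      rw [this, foldl_shift (stepA revG) (stepA_shift revG) F]
    rw [houter]
    simp [List.append_assoc]

lemma procB_delta (graph : List (String × List String)) :
    ∀ (F : List String) (R : PySem.Set String),
      (procB graph F R).1 = R ++ (procB graph F R).2 ∧
      (procB graph F R).2.Nodup ∧
      ∀ x ∈ (procB graph F R).2, x ∈ (graph.map Prod.fst) ∧ x ∉ R := by
  intro F
  induction F with
  | nil => intro R; simp [procB]
  | cons v F ih =>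
    intro R
    have hscan : ∀ (v' : String) (st : PySem.Set String × List String), crt_scan graph v' st =
        (PySem.Dict.mk graph).keys.foldl
          (gstep (fun R u => !(PySem.Set.contains R u) &&
            ((PySem.Dict.mk graph).getD u []).contains v')) st := fun v' st => rfl
    have hc : ∀ (R : PySem.Set String) (u : String),
        (!(PySem.Set.contains R u) && ((PySem.Dict.mk graph).getD u []).contains v) = true →
        u ∉ R := by
      intro R u hcu hmem
      have h1 := (Bool.and_eq_true _ _).mp hcu |>.1
      rw [(PySem.Set.contains_iff R u).mpr hmem] at h1
      simp at h1
    obtain ⟨g1, g2, g3⟩ := runG_delta _ hc (PySem.Dict.mk graph).keys R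
    set d0 := ((PySem.Dict.mk graph).keys.foldl
      (gstep (fun R u => !(PySem.Set.contains R u) &&
        ((PySem.Dict.mk graph).getD u []).contains v)) (R, [])).2 with hd0
    have hscan0 : crt_scan graph v (R, []) = (R ++ d0, d0) := by
      rw [hscan v]
      exact Prod.ext g1 rfl
    have hkeys : (PySem.Dict.mk graph).keys = graph.map Prod.fst := rfl
    have hcsh : ∀ (R : PySem.Set String) (q : List String) (v' : String),
        (fun st v' => crt_scan graph v' st) (R, q) v' =
          (((fun st v' => crt_scan graph v' st) (R, []) v').1,
            q ++ ((fun st v' => crt_scan graph v' st) (R, []) v').2) := by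
      intro R q v'
      simp only
      rw [hscan v', hscan v', foldl_shift _ (gstep_shift _) _ R q]
    have hout : procB graph (v :: F) R =
        ((procB graph F (R ++ d0)).1, d0 ++ (procB graph F (R ++ d0)).2) := by
      unfold procB
      simp only [List.foldl_cons]
      rw [hscan0, foldl_shift _ hcsh F]
    obtain ⟨i1, i2, i3⟩ := ih (R ++ d0)
    rw [hout]
    refine ⟨?_, ?_, ?_⟩
    · simp only
      rw [i1, ← List.append_assoc]
    · simp only
      refine List.Nodup.append g2 i2 fun x hx0 hx1 => ?_
      exact (i3 x hx1).2 (by simp [hx0])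
    · intro x hx
      rcases List.mem_append.mp hx with h0 | h1
      · exact ⟨by rw [← hkeys]; exact (g3 x h0).1, (g3 x h0).2⟩
      · exact ⟨(i3 x h1).1, fun hxR => (i3 x h1).2 (by simp [hxR])⟩

lemma bfs_round (graph : List (String × List String)) (R : PySem.Set String)
    (v : String) (F : List String) (m' : Nat) :
    bfs_loop (build_reverse_graph graph) ((v :: F).length + m') R (v :: F) =
      bfs_loop (build_reverse_graph graph) m' (procB graph (v :: F) R).1
        (procB graph (v :: F) R).2 := by
  have h := bfs_loop_decomp (build_reverse_graph graph) (v :: F) [] R m'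
  rw [List.append_nil] at h
  rw [h, procA_eq_procB]
  simp

lemma crt_round (graph : List (String × List String)) (R : PySem.Set String)
    (v : String) (F : List String) (k : Nat) :
    crt_loop graph (k + 1) R (v :: F) =
      crt_loop graph k (procB graph (v :: F) R).1 (procB graph (v :: F) R).2 := by
  simp only [crt_loop, procB]

-- counting: one round shrinks the set of keys still missing from reachable by exactly |d|
lemma round_count (graph : List (String × List String)) (R : PySem.Set String)
    (F : List String) :
    ((graph.map Prod.fst).toFinset \ (procB graph F R).1.toFinset).card +
        (procB graph F R).2.length =
      ((graph.map Prod.fst).toFinset \ R.toFinset).card ∧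
      (procB graph F R).2.length ≤ ((graph.map Prod.fst).toFinset \ R.toFinset).card := by
  obtain ⟨h1, h2, h3⟩ := procB_delta graph F R
  set d := (procB graph F R).2 with hd
  have hsub : d.toFinset ⊆ (graph.map Prod.fst).toFinset \ R.toFinset := by
    intro x hx
    have hx' := List.mem_toFinset.mp hx
    exact Finset.mem_sdiff.mpr ⟨List.mem_toFinset.mpr (h3 x hx').1,
      fun hR => (h3 x hx').2 (List.mem_toFinset.mp hR)⟩
  have hlen : d.toFinset.card = d.length := List.toFinset_card_of_nodup h2
  have hP1 : (procB graph F R).1.toFinset = R.toFinset ∪ d.toFinset := by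
    rw [h1, List.toFinset_append]
  have hsd : (graph.map Prod.fst).toFinset \ (procB graph F R).1.toFinset =
      ((graph.map Prod.fst).toFinset \ R.toFinset) \ d.toFinset := by
    rw [hP1]
    ext x
    simp
    tauto
  have hle2 : d.length ≤ ((graph.map Prod.fst).toFinset \ R.toFinset).card := by
    rw [← hlen]
    exact Finset.card_le_card hsub
  have hcardEq : (((graph.map Prod.fst).toFinset \ R.toFinset) \ d.toFinset).card =
      ((graph.map Prod.fst).toFinset \ R.toFinset).card - d.length := by
    rw [Finset.card_sdiff, Finset.inter_eq_left.mpr hsub, hlen]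
  refine ⟨?_, hle2⟩
  rw [hsd, hcardEq]
  omega

lemma main_lemma (graph : List (String × List String)) :
    ∀ (k : Nat) (R : PySem.Set String) (F : List String) (m : Nat),
      m ≥ F.length + ((graph.map Prod.fst).toFinset \ R.toFinset).card →
      k ≥ ((graph.map Prod.fst).toFinset \ R.toFinset).card →
      bfs_loop (build_reverse_graph graph) m R F = crt_loop graph (k + 1) R F := by
  intro k
  induction k with
  | zero =>
    intro R F m hm hk
    cases F with
    | nil => rw [bfs_loop_nil, crt_loop_nil]
    | cons v F =>
      obtain ⟨hc1, hc2⟩ := round_count graph R (v :: F)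
      have hd : (procB graph (v :: F) R).2 = [] := by
        cases hdd : (procB graph (v :: F) R).2 with
        | nil => rfl
        | cons y d' =>
          exfalso
          rw [hdd] at hc2
          simp at hc2
          omega
      have hm' : m = (v :: F).length + (m - (v :: F).length) := by
        simp at hm ⊢; omega
      rw [hm', bfs_round, crt_round, hd, bfs_loop_nil, crt_loop_nil]
  | succ k ih =>
    intro R F m hm hk
    cases F with
    | nil => rw [bfs_loop_nil, crt_loop_nil]
    | cons v F =>
      obtain ⟨hc1, hc2⟩ := round_count graph R (v :: F)
      have hm' : m = (v :: F).length + (m - (v :: F).length) := by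
        simp at hm ⊢; omega
      rw [hm', bfs_round, crt_round]
      cases hdd : (procB graph (v :: F) R).2 with
      | nil => rw [bfs_loop_nil, crt_loop_nil]
      | cons y d' =>
        rw [← hdd]
        have hdl : 1 ≤ (procB graph (v :: F) R).2.length := by rw [hdd]; simp
        apply ih
        · simp only [List.length_cons] at *
          omega
        · omega

-- ===== VERDICT (by name: the statement is the Claim_ definition above) =====
theorem can_reach_target_spec : Claim_equal_can_reach_target := by
  intro graph target _ _
  unfold Spec_can_reach_target can_reach_target can_reach_target_alt
  have hcard : ((graph.map Prod.fst).toFinset \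
      (PySem.Set.ofList [target]).toFinset).card ≤ graph.length := by
    calc ((graph.map Prod.fst).toFinset \ (PySem.Set.ofList [target]).toFinset).card
        ≤ (graph.map Prod.fst).toFinset.card := Finset.card_le_card Finset.sdiff_subset
      _ ≤ (graph.map Prod.fst).length := List.toFinset_card_le _
      _ = graph.length := by simp
  exact main_lemma graph graph.length (PySem.Set.ofList [target]) [target]
    (graph.length + 1) (by simp only [List.length_cons, List.length_nil]; omega) (by omega)
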